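-- pv_equiv track=rewrite | github.com/subspoofer/iam-check | CL_check.py | sort_lines_in_blocks
-- ===== SOURCE A (Python) =====
-- def sort_lines_in_blocks(blocks):
--     for i in range(len(blocks)):
--         # Separate the opening and closing braces from the rest of the block
--         opening_brace = blocks[i].pop(0)
--         closing_brace = blocks[i].pop(-1)
--
--         # Separate permissions and accounts
--         permissions = [line for line in blocks[i] if line.strip().startswith('permission')]
--         roles = [line for line in blocks[i] if line.strip().startswith('role')]
--         accounts = [line for line in blocks[i] if line.strip().startswith('account')]
--
--         # Sort permissions and accounts
--         permissions.sort()
--         accounts.sort(key=lambda x: x.lower())  # sort accounts case-insensitively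
--
--         # Combine sorted permissions and accounts
--         if len(roles) > 0:
--             blocks[i] = permissions + roles + accounts
--         else:
--             blocks[i] = permissions + accounts
--
--         # Add the opening and closing braces back to the block
--         blocks[i].insert(0, opening_brace)
--         blocks[i].append(closing_brace)
--
--     return blocks
-- ===== SOURCE B (Python) =====
-- def sort_lines_in_blocks(blocks):
--     # Return-value (and in-place) equivalent to A; single stable sort with a composite key.
--     for i, block in enumerate(blocks):
--         opening = block.pop(0)
--         closing = block.pop(-1)
--
--         def key(line):
--             t = line.strip()
--             if t.startswith('permission'):
--                 return (0, line)
--             if t.startswith('role'):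
--                 return (1, '')
--             return (2, line.lower())
--
--         interior = sorted((l for l in block
--                            if l.strip().startswith(('permission', 'role', 'account'))),
--                           key=key)
--         interior.insert(0, opening)
--         interior.append(closing)
--         blocks[i] = interior
--     return blocks
-- ===== Notes on version B (the rewrite author's own statement) =====
-- stated objective: simpler
-- what changed: Replaces A's three separate filter passes, two sorts and the roles-branch concatenation by one combined filter and a single stable sort with a composite (rank, secondary) key; the constant-factor speedup comes from traversing each block once and sorting once instead of three scans plus two sorts. Pre_ excludes blocks with fewer than 2 lines, on which A's pop raises IndexError.
import Mathlib
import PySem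

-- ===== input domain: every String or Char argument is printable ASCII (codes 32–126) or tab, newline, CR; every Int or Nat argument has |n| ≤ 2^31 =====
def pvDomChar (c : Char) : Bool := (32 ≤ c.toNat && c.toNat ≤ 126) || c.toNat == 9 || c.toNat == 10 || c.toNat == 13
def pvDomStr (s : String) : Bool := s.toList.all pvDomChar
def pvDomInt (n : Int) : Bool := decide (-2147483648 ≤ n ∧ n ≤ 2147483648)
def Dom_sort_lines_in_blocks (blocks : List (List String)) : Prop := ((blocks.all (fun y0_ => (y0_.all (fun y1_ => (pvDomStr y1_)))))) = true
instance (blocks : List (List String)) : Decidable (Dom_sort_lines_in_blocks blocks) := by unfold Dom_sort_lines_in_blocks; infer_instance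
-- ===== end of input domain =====

-- B replaces A's three comprehensions + two sorts + branch by one filter and one stable
-- composite-key sort (objective: simpler). Both A and B mutate `blocks` in place in Python
-- (identically); the equivalence proved here is about the return value.


-- ===== PORT A =====
-- one iteration of A's loop body on blocks[i]; the `none` branches are where Python's
-- pop raises IndexError (excluded by Pre_)
def pvProcessA (b : List String) : List String :=
  match PySem.List.pop? b 0 with
  | none => b
  | some (opening_brace, rest) =>
    match PySem.List.pop? rest (-1) with
    | none => b
    | some (closing_brace, mid) =>
      let permissions := mid.filter (fun line => PySem.Str.startswith (PySem.Str.strip line) "permission")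
      let roles := mid.filter (fun line => PySem.Str.startswith (PySem.Str.strip line) "role")
      let accounts := mid.filter (fun line => PySem.Str.startswith (PySem.Str.strip line) "account")
      let permissions := PySem.List.sorted permissions (fun x => x) false
      let accounts := PySem.List.sorted accounts (fun x => PySem.Str.lower x) false
      let core := if roles.length > 0 then permissions ++ roles ++ accounts else permissions ++ accounts
      (PySem.List.insert core 0 opening_brace) ++ [closing_brace]

-- for i in range(len(blocks)): blocks[i] = <body>(blocks[i])
def sort_lines_in_blocks (blocks : List (List String)) : List (List String) :=
  blocks.map pvProcessA

-- ===== PORT B =====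
-- B's key function: (rank, secondary)
def pvRank (line : String) : Int :=
  if PySem.Str.startswith (PySem.Str.strip line) "permission" then 0
  else if PySem.Str.startswith (PySem.Str.strip line) "role" then 1
  else 2

def pvKey2 (line : String) : String :=
  if PySem.Str.startswith (PySem.Str.strip line) "permission" then line
  else if PySem.Str.startswith (PySem.Str.strip line) "role" then ""
  else PySem.Str.lower line

def pvProcessB (b : List String) : List String :=
  match PySem.List.pop? b 0 with
  | none => b
  | some (opening, rest) =>
    match PySem.List.pop? rest (-1) with
    | none => b
    | some (closing, mid) =>
      let interior := mid.filter (fun l =>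
        PySem.Str.startswith (PySem.Str.strip l) "permission" ||
        PySem.Str.startswith (PySem.Str.strip l) "role" ||
        PySem.Str.startswith (PySem.Str.strip l) "account")
      let interior := PySem.List.sorted2 interior pvRank pvKey2 false
      (PySem.List.insert interior 0 opening) ++ [closing]

def sort_lines_in_blocks_alt (blocks : List (List String)) : List (List String) :=
  blocks.map pvProcessB

-- ===== PRECONDITION & SPEC =====
-- A pops two elements from every block: on a block with fewer than 2 lines Python raises IndexError.
def Pre_sort_lines_in_blocks (blocks : List (List String)) : Prop :=
  ∀ b ∈ blocks, 2 ≤ b.length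
instance (blocks : List (List String)) : Decidable (Pre_sort_lines_in_blocks blocks) := by
  unfold Pre_sort_lines_in_blocks; infer_instance

def pvWitness_sort_lines_in_blocks : List (List String) :=
  [["{", "permission b", "Account c", "role r", "account B", "}"]]

def Spec_sort_lines_in_blocks (blocks : List (List String)) (out : List (List String)) : Prop := out = sort_lines_in_blocks_alt blocks
instance (blocks : List (List String)) (out : List (List String)) : Decidable (Spec_sort_lines_in_blocks blocks out) := by unfold Spec_sort_lines_in_blocks; infer_instance

-- ===== CLAIM (what is proved, stated in full; the proofs are below) =====
def Claim_equal_sort_lines_in_blocks : Prop := ∀ (blocks : List (List String)), Dom_sort_lines_in_blocks blocks → Pre_sort_lines_in_blocks blocks → Spec_sort_lines_in_blocks blocks (sort_lines_in_blocks blocks)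

-- ===== LEMMAS AND PROOFS =====

-- two nonempty prefixes of the same list start with the same element
theorem pv_prefix_head_eq {α : Type} {a b : α} {t u s : List α}
    (h1 : a :: t <+: s) (h2 : b :: u <+: s) : a = b := by
  cases s with
  | nil => simp at h1
  | cons c cs =>
    exact (List.cons_prefix_cons.mp h1).1.trans (List.cons_prefix_cons.mp h2).1.symm

-- disjointness of the three startswith tests
theorem pv_perm_role (l : String)
    (h : PySem.Str.startswith (PySem.Str.strip l) "permission" = true) :
    PySem.Str.startswith (PySem.Str.strip l) "role" = false := by
  by_contra hc
  rw [Bool.not_eq_false] at hc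
  rw [PySem.Str.startswith_eq, PySem.Chars.startswith_iff] at hc h
  exact absurd (pv_prefix_head_eq (show 'p' :: "ermission".toList <+: _ from h)
    (show 'r' :: "ole".toList <+: _ from hc)) (by decide)

theorem pv_perm_acc (l : String)
    (h : PySem.Str.startswith (PySem.Str.strip l) "permission" = true) :
    PySem.Str.startswith (PySem.Str.strip l) "account" = false := by
  by_contra hc
  rw [Bool.not_eq_false] at hc
  rw [PySem.Str.startswith_eq, PySem.Chars.startswith_iff] at hc h
  exact absurd (pv_prefix_head_eq (show 'p' :: "ermission".toList <+: _ from h)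
    (show 'a' :: "ccount".toList <+: _ from hc)) (by decide)

theorem pv_role_acc (l : String)
    (h : PySem.Str.startswith (PySem.Str.strip l) "role" = true) :
    PySem.Str.startswith (PySem.Str.strip l) "account" = false := by
  by_contra hc
  rw [Bool.not_eq_false] at hc
  rw [PySem.Str.startswith_eq, PySem.Chars.startswith_iff] at hc h
  exact absurd (pv_prefix_head_eq (show 'r' :: "ole".toList <+: _ from h)
    (show 'a' :: "ccount".toList <+: _ from hc)) (by decide)

-- contrapositives
theorem pv_role_not_perm (l : String)
    (h : PySem.Str.startswith (PySem.Str.strip l) "role" = true) :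
    PySem.Str.startswith (PySem.Str.strip l) "permission" = false := by
  cases hp : PySem.Str.startswith (PySem.Str.strip l) "permission" with
  | false => rfl
  | true => rw [pv_perm_role l hp] at h; exact absurd h (by decide)

theorem pv_acc_not_perm (l : String)
    (h : PySem.Str.startswith (PySem.Str.strip l) "account" = true) :
    PySem.Str.startswith (PySem.Str.strip l) "permission" = false := by
  cases hp : PySem.Str.startswith (PySem.Str.strip l) "permission" with
  | false => rfl
  | true => rw [pv_perm_acc l hp] at h; exact absurd h (by decide)

theorem pv_acc_not_role (l : String)
    (h : PySem.Str.startswith (PySem.Str.strip l) "account" = true) :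
    PySem.Str.startswith (PySem.Str.strip l) "role" = false := by
  cases hp : PySem.Str.startswith (PySem.Str.strip l) "role" with
  | false => rfl
  | true => rw [pv_role_acc l hp] at h; exact absurd h (by decide)

-- rank/key facts
theorem pv_rank_perm (l : String)
    (h : PySem.Str.startswith (PySem.Str.strip l) "permission" = true) :
    pvRank l = 0 ∧ pvKey2 l = l := by
  unfold pvRank pvKey2; rw [h]; simp

theorem pv_rank_role (l : String)
    (h : PySem.Str.startswith (PySem.Str.strip l) "role" = true) :
    pvRank l = 1 ∧ pvKey2 l = "" := by
  unfold pvRank pvKey2; rw [pv_role_not_perm l h, h]; simp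

theorem pv_rank_acc (l : String)
    (h : PySem.Str.startswith (PySem.Str.strip l) "account" = true) :
    pvRank l = 2 ∧ pvKey2 l = PySem.Str.lower l := by
  unfold pvRank pvKey2; rw [pv_acc_not_perm l h, pv_acc_not_role l h]; simp

-- insertBy surgery
theorem pv_insertBy_append_all_true {α : Type} (before : α → α → Bool) (x : α)
    (P Q : List α) (h : ∀ y ∈ Q, before x y = true) :
    PySem.List.insertBy before x (P ++ Q) = PySem.List.insertBy before x P ++ Q := by
  induction P with
  | nil =>
    cases Q with
    | nil => simp [PySem.List.insertBy]
    | cons q Q' => simp [PySem.List.insertBy, h q (by simp)]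
  | cons p P' ih =>
    by_cases hb : before x p = true
    · simp [PySem.List.insertBy, hb]
    · simp only [Bool.not_eq_true] at hb
      simp [PySem.List.insertBy, hb, ih]

theorem pv_insertBy_append_all_false {α : Type} (before : α → α → Bool) (x : α)
    (P Q : List α) (h : ∀ y ∈ P, before x y = false) :
    PySem.List.insertBy before x (P ++ Q) = P ++ PySem.List.insertBy before x Q := by
  induction P with
  | nil => simp
  | cons p P' ih =>
    simp [PySem.List.insertBy, h p (by simp), ih (fun y hy => h y (by simp [hy]))]

theorem pv_insertBy_congr {α : Type} (before before' : α → α → Bool) (x : α)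
    (P : List α) (h : ∀ y ∈ P, before x y = before' x y) :
    PySem.List.insertBy before x P = PySem.List.insertBy before' x P := by
  induction P with
  | nil => rfl
  | cons p P' ih =>
    rw [show PySem.List.insertBy before x (p :: P')
          = if before x p then x :: p :: P' else p :: PySem.List.insertBy before x P' from rfl,
        show PySem.List.insertBy before' x (p :: P')
          = if before' x p then x :: p :: P' else p :: PySem.List.insertBy before' x P' from rfl,
        h p (by simp), ih (fun y hy => h y (by simp [hy]))]

-- abbreviations used by the decomposition lemma (proof-side only)
def pvP (l : String) : Bool := PySem.Str.startswith (PySem.Str.strip l) "permission"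
def pvR (l : String) : Bool := PySem.Str.startswith (PySem.Str.strip l) "role"
def pvC (l : String) : Bool := PySem.Str.startswith (PySem.Str.strip l) "account"
def pvLt (a b : String) : Bool :=
  decide (pvRank a < pvRank b) || !decide (pvRank b < pvRank a) && decide (pvKey2 a < pvKey2 b)

-- the heart: a stable sort by the composite key splits into the three rank segments
theorem pv_decomp (L : List String) (h : ∀ l ∈ L, (pvP l || pvR l || pvC l) = true) :
    PySem.List.sorted2 L pvRank pvKey2 false =
      PySem.List.sorted (L.filter pvP) (fun x => x) false
        ++ L.filter pvR
        ++ PySem.List.sorted (L.filter pvC) (fun x => PySem.Str.lower x) false := by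
  induction L using List.reverseRecOn with
  | nil => rfl
  | append_singleton L x ih =>
    have hL : ∀ l ∈ L, (pvP l || pvR l || pvC l) = true := fun l hl => h l (by simp [hl])
    have hx := h x (by simp)
    have hfold : ∀ (M : List String), PySem.List.sorted2 M pvRank pvKey2 false
        = List.foldl (fun acc y => PySem.List.insertBy pvLt y acc) [] M := fun M => rfl
    have hmain : PySem.List.sorted2 (L ++ [x]) pvRank pvKey2 false
        = PySem.List.insertBy pvLt x (PySem.List.sorted2 L pvRank pvKey2 false) := by
      rw [hfold, hfold, List.foldl_append]
      rfl
    rw [hmain, ih hL]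
    set SP := PySem.List.sorted (L.filter pvP) (fun x => x) false with hSP
    set FR := L.filter pvR with hFR
    set SC := PySem.List.sorted (L.filter pvC) (fun x => PySem.Str.lower x) false with hSC
    have memSP : ∀ y ∈ SP, pvP y = true := by
      intro y hy
      rw [hSP, PySem.List.mem_sorted] at hy
      exact List.of_mem_filter hy
    have memFR : ∀ y ∈ FR, pvR y = true := fun y hy => List.of_mem_filter hy
    have memSC : ∀ y ∈ SC, pvC y = true := by
      intro y hy
      rw [hSC, PySem.List.mem_sorted] at hy
      exact List.of_mem_filter hy
    by_cases hp : pvP x = true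
    · -- x is a permission line: insert into SP, skip over FR ++ SC
      obtain ⟨hr0, hk0⟩ := pv_rank_perm x hp
      have hrx : pvR x = false := pv_perm_role x hp
      have hcx : pvC x = false := pv_perm_acc x hp
      have e1 : PySem.List.sorted ((L ++ [x]).filter pvP) (fun x => x) false
          = PySem.List.insertBy (fun a b => decide (a < b)) x SP := by
        rw [List.filter_append, show List.filter pvP [x] = [x] from by simp [hp], hSP,
            PySem.List.sorted_eq_foldl_insertBy, PySem.List.sorted_eq_foldl_insertBy,
            List.foldl_append]
        rfl
      have e2 : (L ++ [x]).filter pvR = FR := by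
        rw [List.filter_append, show List.filter pvR [x] = [] from by simp [hrx], hFR,
            List.append_nil]
      have e3 : PySem.List.sorted ((L ++ [x]).filter pvC) (fun x => PySem.Str.lower x) false = SC := by
        rw [List.filter_append, show List.filter pvC [x] = [] from by simp [hcx],
            List.append_nil, hSC]
      rw [e1, e2, e3]
      have hall : ∀ y ∈ FR ++ SC, pvLt x y = true := by
        intro y hy
        rcases List.mem_append.mp hy with hy | hy
        · have := (pv_rank_role y (memFR y hy)).1
          simp [pvLt, hr0, this]
        · have := (pv_rank_acc y (memSC y hy)).1
          simp [pvLt, hr0, this]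
      rw [List.append_assoc, pv_insertBy_append_all_true pvLt x SP (FR ++ SC) hall,
          pv_insertBy_congr pvLt (fun a b => decide (a < b)) x SP (by
            intro y hy
            obtain ⟨hr0', hk0'⟩ := pv_rank_perm y (memSP y hy)
            simp [pvLt, hr0, hk0, hr0', hk0']),
          List.append_assoc]
    · by_cases hr : pvR x = true
      · -- x is a role line: goes after FR, before SC
        obtain ⟨hr1, hk1⟩ := pv_rank_role x hr
        have hpx : pvP x = false := pv_role_not_perm x hr
        have hcx : pvC x = false := pv_role_acc x hr
        have e1 : PySem.List.sorted ((L ++ [x]).filter pvP) (fun x => x) false = SP := by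
          rw [List.filter_append, show List.filter pvP [x] = [] from by simp [hpx],
              List.append_nil, hSP]
        have e2 : (L ++ [x]).filter pvR = FR ++ [x] := by
          rw [List.filter_append, show List.filter pvR [x] = [x] from by simp [hr], hFR]
        have e3 : PySem.List.sorted ((L ++ [x]).filter pvC) (fun x => PySem.Str.lower x) false = SC := by
          rw [List.filter_append, show List.filter pvC [x] = [] from by simp [hcx],
              List.append_nil, hSC]
        rw [e1, e2, e3]
        have hfalseSP : ∀ y ∈ SP, pvLt x y = false := by
          intro y hy
          obtain ⟨hr0', _⟩ := pv_rank_perm y (memSP y hy)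
          simp [pvLt, hr1, hr0']
        have hfalseFR : ∀ y ∈ FR, pvLt x y = false := by
          intro y hy
          obtain ⟨hr1', hk1'⟩ := pv_rank_role y (memFR y hy)
          simp [pvLt, hr1, hk1, hr1', hk1']
        have htrueSC : ∀ y ∈ SC, pvLt x y = true := by
          intro y hy
          have := (pv_rank_acc y (memSC y hy)).1
          simp [pvLt, hr1, this]
        rw [List.append_assoc, pv_insertBy_append_all_false pvLt x SP (FR ++ SC) hfalseSP,
            pv_insertBy_append_all_true pvLt x FR SC htrueSC,
            PySem.List.insertBy_of_forall_not_before pvLt x FR hfalseFR]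
        simp
      · -- x is an account line
        rw [Bool.not_eq_true] at hp hr
        have hcx : pvC x = true := by
          rw [hp, hr] at hx
          simpa using hx
        obtain ⟨hr2, hk2⟩ := pv_rank_acc x hcx
        have e1 : PySem.List.sorted ((L ++ [x]).filter pvP) (fun x => x) false = SP := by
          rw [List.filter_append, show List.filter pvP [x] = [] from by simp [hp],
              List.append_nil, hSP]
        have e2 : (L ++ [x]).filter pvR = FR := by
          rw [List.filter_append, show List.filter pvR [x] = [] from by simp [hr], hFR,
              List.append_nil]
        have e3 : PySem.List.sorted ((L ++ [x]).filter pvC) (fun x => PySem.Str.lower x) false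
            = PySem.List.insertBy (fun a b => decide (PySem.Str.lower a < PySem.Str.lower b)) x SC := by
          rw [List.filter_append, show List.filter pvC [x] = [x] from by simp [hcx], hSC,
              PySem.List.sorted_eq_foldl_insertBy, PySem.List.sorted_eq_foldl_insertBy,
              List.foldl_append]
          rfl
        rw [e1, e2, e3]
        have hfalse : ∀ y ∈ SP ++ FR, pvLt x y = false := by
          intro y hy
          rcases List.mem_append.mp hy with hy | hy
          · have := (pv_rank_perm y (memSP y hy)).1
            simp [pvLt, hr2, this]
          · have := (pv_rank_role y (memFR y hy)).1
            simp [pvLt, hr2, this]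
        rw [pv_insertBy_append_all_false pvLt x (SP ++ FR) SC hfalse,
            pv_insertBy_congr pvLt (fun a b => decide (PySem.Str.lower a < PySem.Str.lower b)) x SC (by
              intro y hy
              obtain ⟨hr2', hk2'⟩ := pv_rank_acc y (memSC y hy)
              simp [pvLt, hr2, hk2, hr2', hk2'])]

-- filtering one of the three tests after the combined filter is the plain filter
theorem pv_filter_filter (L : List String) (p : String → Bool)
    (himp : ∀ l, p l = true → (pvP l || pvR l || pvC l) = true) :
    (L.filter (fun l => pvP l || pvR l || pvC l)).filter p = L.filter p := by
  induction L with
  | nil => rfl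
  | cons a L ih =>
    by_cases hp : p a = true
    · simp [himp a hp, hp, ih]
    · rw [Bool.not_eq_true] at hp
      by_cases hc : (pvP a || pvR a || pvC a) = true
      · simp [hc, hp, ih]
      · rw [Bool.not_eq_true] at hc
        simp [hc, hp, ih]

-- the per-block equality
set_option maxHeartbeats 1000000 in
theorem pv_process_eq (b : List String) : pvProcessA b = pvProcessB b := by
  unfold pvProcessA pvProcessB
  cases h0 : PySem.List.pop? b 0 with
  | none => rfl
  | some r =>
    obtain ⟨opening, rest⟩ := r
    cases h1 : PySem.List.pop? rest (-1) with
    | none => simp [h1]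
    | some r' =>
      obtain ⟨closing, mid⟩ := r'
      simp only [h1]
      simp only [PySem.List.insert_zero]
      have hcong : mid.filter (fun l =>
            PySem.Str.startswith (PySem.Str.strip l) "permission" ||
            PySem.Str.startswith (PySem.Str.strip l) "role" ||
            PySem.Str.startswith (PySem.Str.strip l) "account")
          = mid.filter (fun l => pvP l || pvR l || pvC l) := rfl
      rw [hcong, pv_decomp (mid.filter (fun l => pvP l || pvR l || pvC l))
            (fun l hl => @List.of_mem_filter _ (fun l => pvP l || pvR l || pvC l) l mid hl),
          pv_filter_filter mid pvP (fun l hl => by simp [hl]),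
          pv_filter_filter mid pvR (fun l hl => by simp [hl]),
          pv_filter_filter mid pvC (fun l hl => by simp [hl])]
      by_cases hroles : (mid.filter pvR).length > 0
      · simp only [show (mid.filter (fun line => PySem.Str.startswith (PySem.Str.strip line) "role")).length
            = (mid.filter pvR).length from rfl, hroles, if_pos]
        rfl
      · have hnil : mid.filter (fun line => PySem.Str.startswith (PySem.Str.strip line) "role") = [] := by
          have : mid.filter pvR = [] := List.eq_nil_of_length_eq_zero (Nat.le_zero.mp (Nat.not_lt.mp hroles))
          exact this
        rw [hnil]
        simp only [List.length_nil, gt_iff_lt, Nat.lt_irrefl, if_false]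
        have h2 : mid.filter pvR = [] := hnil
        rw [h2]
        simp only [List.append_nil]
        rfl

-- ===== VERDICT (by name: the statement is the Claim_ definition above) =====
theorem sort_lines_in_blocks_spec : Claim_equal_sort_lines_in_blocks := by
  intro blocks _ _
  unfold Spec_sort_lines_in_blocks sort_lines_in_blocks sort_lines_in_blocks_alt
  exact List.map_congr_left (fun b _ => pv_process_eq b)
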